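-- pv_equiv track=rewrite | github.com/TechSnekv0/DeCellular | tools/ninetiler.py | interpretTilesList
-- ===== SOURCE A (Python) =====
-- def interpretTilesList(tiles):
--     outlist = []
--     for i in range(9):
--         partlist = []
--         for tile in tiles:
--             if tile[2] == i+1:
--                 partlist.append(tile[:2])
--         outlist.append(partlist)
--     return outlist
-- ===== SOURCE B (Python) =====
-- def interpretTilesList(tiles):
--     buckets = [[] for _ in range(9)]
--     for tile in tiles:
--         k = tile[2]
--         if 1 <= k <= 9:
--             buckets[k - 1].append(tile[:2])
--     return buckets
-- ===== Notes on version B (the rewrite author's own statement) =====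
-- stated objective: alternative
-- what changed: Replaces A's nine full passes over the tile list (one filter pass per bucket) with a single pass that routes each tile directly into its bucket by index.
import Mathlib
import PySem

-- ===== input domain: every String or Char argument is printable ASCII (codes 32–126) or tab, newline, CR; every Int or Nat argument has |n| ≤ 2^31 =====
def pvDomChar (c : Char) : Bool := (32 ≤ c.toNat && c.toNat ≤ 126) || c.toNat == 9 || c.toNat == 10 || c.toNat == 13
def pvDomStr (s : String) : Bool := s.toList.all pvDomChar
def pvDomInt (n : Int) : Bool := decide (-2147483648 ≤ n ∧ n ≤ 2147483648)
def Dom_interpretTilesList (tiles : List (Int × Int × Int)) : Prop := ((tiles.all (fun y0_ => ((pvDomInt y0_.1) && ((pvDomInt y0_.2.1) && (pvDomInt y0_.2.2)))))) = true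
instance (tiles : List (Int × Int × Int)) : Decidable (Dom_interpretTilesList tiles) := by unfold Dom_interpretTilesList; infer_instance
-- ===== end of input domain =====

-- B replaces A's nine filter passes over the tile list by one pass routing each tile to its bucket by index.


-- ===== PORT A =====
-- literal port of A: for i in range(9) build partlist by scanning all tiles, append it to outlist
def interpretTilesList (tiles : List (Int × Int × Int)) : List (List (Int × Int)) :=
  (PySem.List.pyRange 0 9 1).foldl
    (fun outlist i =>
      outlist ++
        [tiles.foldl
          (fun partlist tile =>
            if tile.2.2 = i + 1 then partlist ++ [(tile.1, tile.2.1)] else partlist)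
          []])
    []

-- ===== PORT B =====
-- literal port of B: 9 empty buckets, one pass appending each tile (with 1 ≤ k ≤ 9) to bucket k-1
def interpretTilesList_alt (tiles : List (Int × Int × Int)) : List (List (Int × Int)) :=
  tiles.foldl
    (fun buckets tile =>
      let k := tile.2.2
      if 1 ≤ k ∧ k ≤ 9 then
        buckets.modify (k - 1).toNat (fun b => b ++ [(tile.1, tile.2.1)])
      else buckets)
    (List.replicate 9 [])

-- ===== PRECONDITION & SPEC =====
def Spec_interpretTilesList (tiles : List (Int × Int × Int)) (out : List (List (Int × Int))) : Prop := out = interpretTilesList_alt tiles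
instance (tiles : List (Int × Int × Int)) (out : List (List (Int × Int))) : Decidable (Spec_interpretTilesList tiles out) := by unfold Spec_interpretTilesList; infer_instance

-- ===== CLAIM (what is proved, stated in full; the proofs are below) =====
def Claim_equal_interpretTilesList : Prop := ∀ (tiles : List (Int × Int × Int)), Dom_interpretTilesList tiles → Spec_interpretTilesList tiles (interpretTilesList tiles)

-- ===== LEMMAS AND PROOFS =====

-- the tiles landing in bucket for value k, in order
def pvPart (tiles : List (Int × Int × Int)) (k : Int) : List (Int × Int) :=
  (tiles.filter (fun t => decide (t.2.2 = k))).map (fun t => (t.1, t.2.1))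

-- B's fold step
def pvStep (buckets : List (List (Int × Int))) (tile : Int × Int × Int) : List (List (Int × Int)) :=
  if 1 ≤ tile.2.2 ∧ tile.2.2 ≤ 9 then
    buckets.modify (tile.2.2 - 1).toNat (fun b => b ++ [(tile.1, tile.2.1)])
  else buckets

lemma pvStep_length (acc : List (List (Int × Int))) (t : Int × Int × Int) :
    (pvStep acc t).length = acc.length := by
  unfold pvStep; split <;> simp

lemma pvFold_length (tiles : List (Int × Int × Int)) (acc : List (List (Int × Int))) :
    (tiles.foldl pvStep acc).length = acc.length := by
  induction tiles generalizing acc with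
  | nil => rfl
  | cons t rest ih => simpa [pvStep_length] using ih (pvStep acc t)

lemma pvFold_getElem (tiles : List (Int × Int × Int)) (acc : List (List (Int × Int)))
    (h9 : acc.length = 9) (j : Nat) (hj : j < 9) :
    (tiles.foldl pvStep acc)[j]'(by rw [pvFold_length, h9]; exact hj) =
      acc[j]'(by omega) ++ pvPart tiles ((j : Int) + 1) := by
  induction tiles generalizing acc with
  | nil => simp [pvPart]
  | cons t rest ih =>
      have hlen : (pvStep acc t).length = 9 := by rw [pvStep_length, h9]
      have := ih (pvStep acc t) hlen
      simp only [List.foldl_cons, this]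
      have hstep : (pvStep acc t)[j]'(by omega) =
          acc[j]'(by omega) ++ (if t.2.2 = (j : Int) + 1 then [(t.1, t.2.1)] else []) := by
        unfold pvStep
        by_cases hk : 1 ≤ t.2.2 ∧ t.2.2 ≤ 9
        · simp only [if_pos hk]
          rw [List.getElem_modify]
          by_cases hc : t.2.2 = (j : Int) + 1
          · have he : (t.2.2 - 1).toNat = j := by omega
            rw [if_pos he, if_pos hc]
          · have he : ¬ (t.2.2 - 1).toNat = j := by omega
            rw [if_neg he, if_neg hc, List.append_nil]
        · have : ¬ t.2.2 = (j : Int) + 1 := by omega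
          simp [if_neg hk, this]
      rw [hstep]
      by_cases hc : t.2.2 = (j : Int) + 1 <;>
        simp [pvPart, hc]
  
lemma pvA_eq (tiles : List (Int × Int × Int)) :
    interpretTilesList tiles = (PySem.List.pyRange 0 9 1).map (fun i => pvPart tiles (i + 1)) := by
  unfold interpretTilesList
  have inner : ∀ i : Int,
      tiles.foldl
        (fun partlist tile =>
          if tile.2.2 = i + 1 then partlist ++ [(tile.1, tile.2.1)] else partlist) [] =
        pvPart tiles (i + 1) := by
    intro i
    simpa [pvPart] using
      PySem.List.foldl_append_ite (l := tiles) (acc := ([] : List (Int × Int)))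
        (p := fun t => t.2.2 = i + 1) (f := fun t => (t.1, t.2.1))
  calc (PySem.List.pyRange 0 9 1).foldl
        (fun outlist i =>
          outlist ++
            [tiles.foldl
              (fun partlist tile =>
                if tile.2.2 = i + 1 then partlist ++ [(tile.1, tile.2.1)] else partlist) []]) []
      = [] ++ (PySem.List.pyRange 0 9 1).map (fun i =>
          tiles.foldl
            (fun partlist tile =>
              if tile.2.2 = i + 1 then partlist ++ [(tile.1, tile.2.1)] else partlist) []) :=
        PySem.List.foldl_append_singleton_eq_map _ _ _
    _ = (PySem.List.pyRange 0 9 1).map (fun i => pvPart tiles (i + 1)) := by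
        simp only [List.nil_append]
        exact List.map_congr_left (fun i _ => inner i)

-- ===== VERDICT (by name: the statement is the Claim_ definition above) =====
theorem interpretTilesList_spec : Claim_equal_interpretTilesList := by
  intro tiles _
  unfold Spec_interpretTilesList
  rw [pvA_eq]
  have hB : interpretTilesList_alt tiles = tiles.foldl pvStep (List.replicate 9 []) := rfl
  rw [hB]
  apply List.ext_getElem
  · simp [pvFold_length, PySem.List.pyRange]
  · intro j hj hj'
    have hj9 : j < 9 := by simpa [pvFold_length] using hj'
    rw [pvFold_getElem tiles (List.replicate 9 []) (by simp) j hj9]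
    simp only [List.getElem_replicate, List.nil_append, List.getElem_map,
      PySem.List.getElem_pyRange_one]
    norm_num
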